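-- pv_equiv track=rewrite | github.com/jgt275/jumblepuzzle | puzzle.py | cartesian_word_join
-- ===== SOURCE A (Python) =====
-- import itertools
--
-- def cartesian_word_join(wordlist, sep=''):
--     """ Function to do a cartesian join between elements of multiple lists """
--     """ Arguments:
--         wordlist - list of lists
--         sep - separator character, default:''
--     """
--
--     word_join = []
--     for w in itertools.product(*wordlist):
--         word_join.append(sep.join(w))
--     return word_join
-- ===== SOURCE B (Python) =====
-- def cartesian_word_join(wordlist, sep=''):
--     """ Cartesian join of the word lists, built incrementally by a fold
--         over the inner lists instead of itertools.product. """
--     if not wordlist: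
--         return ['']
--     result = [sep.join((w,)) for w in wordlist[0]]
--     for wl in wordlist[1:]:
--         result = [p + sep + w for p in result for w in wl]
--     return result
-- ===== Notes on version B (the rewrite author's own statement) =====
-- stated objective: alternative
-- what changed: Replaces itertools.product plus a per-tuple sep.join with an incremental fold that extends the partial joined strings list-by-list, so no tuples are ever materialised and joins happen one concatenation at a time.
import Mathlib
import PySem

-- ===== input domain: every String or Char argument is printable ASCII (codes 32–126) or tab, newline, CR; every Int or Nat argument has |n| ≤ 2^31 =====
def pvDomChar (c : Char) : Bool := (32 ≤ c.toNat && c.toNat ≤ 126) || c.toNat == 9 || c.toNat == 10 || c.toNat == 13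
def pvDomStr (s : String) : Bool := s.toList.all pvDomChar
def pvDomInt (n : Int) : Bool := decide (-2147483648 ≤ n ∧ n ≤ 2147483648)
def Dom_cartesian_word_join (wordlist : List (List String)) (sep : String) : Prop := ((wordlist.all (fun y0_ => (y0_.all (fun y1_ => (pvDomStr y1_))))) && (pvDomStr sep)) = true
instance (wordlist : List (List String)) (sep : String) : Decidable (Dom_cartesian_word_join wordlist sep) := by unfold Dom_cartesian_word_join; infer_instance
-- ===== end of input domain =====

-- B replaces itertools.product + per-tuple join with an incremental fold extending partial joined strings; alternative decomposition, same results.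


-- ===== PORT A =====
-- itertools.product(*wordlist): outer list varies slowest
def pvProduct : List (List String) → List (List String)
  | [] => [[]]
  | l :: ls => l.flatMap (fun x => (pvProduct ls).map (fun t => x :: t))

def cartesian_word_join (wordlist : List (List String)) (sep : String) : List String :=
  (pvProduct wordlist).map (fun w => PySem.Str.join sep w)

-- ===== PORT B =====
def cartesian_word_join_alt (wordlist : List (List String)) (sep : String) : List String :=
  match wordlist with
  | [] => [""]
  | l0 :: rest =>
    rest.foldl
      (fun result wl => result.flatMap (fun p => wl.map (fun w => p ++ sep ++ w)))
      (l0.map (fun w => PySem.Str.join sep [w]))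

-- ===== PRECONDITION & SPEC =====
def Spec_cartesian_word_join (wordlist : List (List String)) (sep : String) (out : List String) : Prop := out = cartesian_word_join_alt wordlist sep
instance (wordlist : List (List String)) (sep : String) (out : List String) : Decidable (Spec_cartesian_word_join wordlist sep out) := by unfold Spec_cartesian_word_join; infer_instance

-- ===== CLAIM (what is proved, stated in full; the proofs are below) =====
def Claim_equal_cartesian_word_join : Prop := ∀ (wordlist : List (List String)) (sep : String), Dom_cartesian_word_join wordlist sep → Spec_cartesian_word_join wordlist sep (cartesian_word_join wordlist sep)

-- ===== LEMMAS AND PROOFS =====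

theorem pvJoin_nil (sep : String) : PySem.Str.join sep [] = "" := by
  simp [PySem.Str.join]

theorem pvJoin_singleton (sep x : String) : PySem.Str.join sep [x] = x := by
  simp [PySem.Str.join]

theorem pvJoin_cons_cons (sep x y : String) (t : List String) :
    PySem.Str.join sep (x :: y :: t) = x ++ sep ++ PySem.Str.join sep (y :: t) := by
  simp only [PySem.Str.join, List.map_cons, PySem.Chars.join_cons_cons]
  simp [String.append_assoc]

theorem pvFoldl_append (sep a b : String) (t : List String) :
    t.foldl (fun s w => s ++ sep ++ w) (a ++ b) =
      a ++ t.foldl (fun s w => s ++ sep ++ w) b := by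
  induction t generalizing b with
  | nil => rfl
  | cons w t ih =>
    have h : a ++ b ++ sep ++ w = a ++ (b ++ sep ++ w) := by simp [String.append_assoc]
    rw [List.foldl_cons, List.foldl_cons, h, ih]

theorem pvJoin_eq_foldl (sep x : String) (t : List String) :
    PySem.Str.join sep (x :: t) = t.foldl (fun s w => s ++ sep ++ w) x := by
  induction t generalizing x with
  | nil => simp [pvJoin_singleton]
  | cons w t ih =>
    rw [pvJoin_cons_cons, ih, List.foldl_cons, ← pvFoldl_append sep (x ++ sep) w t]

theorem pvInvariant (sep : String) (rest : List (List String)) (acc : List String) :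
    rest.foldl (fun result wl => result.flatMap (fun p => wl.map (fun w => p ++ sep ++ w))) acc =
      acc.flatMap (fun p => (pvProduct rest).map (fun t => t.foldl (fun s w => s ++ sep ++ w) p)) := by
  induction rest generalizing acc with
  | nil => simp [pvProduct]
  | cons wl rest ih =>
    rw [List.foldl_cons, ih]
    simp [pvProduct, List.flatMap_assoc, List.map_flatMap, List.flatMap_map,
      Function.comp_def, List.foldl_cons]

-- ===== VERDICT (by name: the statement is the Claim_ definition above) =====
theorem cartesian_word_join_spec : Claim_equal_cartesian_word_join := by
  intro wordlist sep _
  unfold Spec_cartesian_word_join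
  cases wordlist with
  | nil => simp [cartesian_word_join, cartesian_word_join_alt, pvProduct, pvJoin_nil]
  | cons l0 rest =>
    simp only [cartesian_word_join, cartesian_word_join_alt]
    rw [pvInvariant]
    simp [pvProduct, List.map_flatMap, Function.comp_def, pvJoin_eq_foldl]
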